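-- pv_equiv track=rewrite | github.com/lee-zion/study-algorithm | software-maestro2/1/main.py | solution
-- ===== SOURCE A (Python) =====
-- def solution(image):
--     """
--     <- : 먼저 <를 찾으면 검색 가능. 반드시 다음 <를 만나기 전까지는 -만 있으므로 <를 찾으면 됨. 반대로 말하면, >를 만나는 순간 <- 이 아니라 <->임
--     -> : <가 없는데
--     """
--     answer = []
--     cnt_len = 0
--     type = None
--     for s in image:
--         if s == "-":
--             cnt_len += 1
--             continue
--         if s == "<":
--             if type == -1:
--                 answer.append([-1, cnt_len])
--             type = -1
--             cnt_len = 0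
--         elif s == ">":
--             if type == -1:
--                 answer.append([0, cnt_len])
--             elif type == 1 or type == None:
--                 answer.append([1, cnt_len])
--             type = 1
--             cnt_len = 0
--     if cnt_len:
--         answer.append([-1, cnt_len])
--     return answer
-- ===== SOURCE B (Python) =====
-- def solution(image):
--     # Two-pass: tokenize into (bracket, preceding-dash-count) events, then
--     # interpret each event against its predecessor bracket (no running state).
--     events = []
--     cnt = 0
--     for ch in image:
--         if ch == "-":
--             cnt += 1
--         elif ch == "<" or ch == ">":
--             events.append((ch, cnt))
--             cnt = 0
--     answer = []
--     for (prev, _), (cur, c) in zip([(None, 0)] + events, events):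
--         if cur == ">":
--             answer.append([0 if prev == "<" else 1, c])
--         elif prev == "<":
--             answer.append([-1, c])
--     if cnt:
--         answer.append([-1, cnt])
--     return answer
-- ===== Notes on version B (the rewrite author's own statement) =====
-- stated objective: alternative
-- what changed: Replaces A's single character loop with mutable (answer, cnt_len, type) state by a two-pass decomposition: first tokenize the string into (bracket, preceding-dash-count) events plus trailing dash count, then emit segments by interpreting each event against its predecessor bracket via a zip over adjacent event pairs, with no running type state.
import Mathlib
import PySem

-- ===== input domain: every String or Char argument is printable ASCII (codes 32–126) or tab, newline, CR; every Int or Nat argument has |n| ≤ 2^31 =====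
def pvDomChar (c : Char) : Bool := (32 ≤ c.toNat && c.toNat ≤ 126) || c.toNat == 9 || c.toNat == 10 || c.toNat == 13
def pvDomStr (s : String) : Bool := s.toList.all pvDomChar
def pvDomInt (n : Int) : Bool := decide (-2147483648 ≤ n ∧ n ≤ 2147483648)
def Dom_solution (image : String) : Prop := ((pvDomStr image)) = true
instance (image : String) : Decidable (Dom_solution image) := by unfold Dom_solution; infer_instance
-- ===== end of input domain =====

-- B re-decomposes A's single stateful character loop into two passes (tokenize into
-- (bracket, dash-count) events, then interpret adjacent event pairs); same cost, clearer.

-- ===== PORT A =====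
-- one loop iteration of A (answer, cnt_len, type)
def stepA (st : List (List Int) × Int × Option Int) (s : Char) :
    List (List Int) × Int × Option Int :=
  let answer := st.1
  let cnt := st.2.1
  let ty := st.2.2
  if s = '-' then (answer, cnt + 1, ty)
  else if s = '<' then
    ((if ty = some (-1) then answer ++ [[-1, cnt]] else answer), 0, some (-1))
  else if s = '>' then
    ((if ty = some (-1) then answer ++ [[0, cnt]]
      else if ty = some 1 ∨ ty = none then answer ++ [[1, cnt]] else answer), 0, some 1)
  else st

def solution (image : String) : List (List Int) :=
  let st := image.toList.foldl stepA ([], 0, none)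
  if st.2.1 ≠ 0 then st.1 ++ [[-1, st.2.1]] else st.1

-- ===== PORT B =====
-- pass 1 of B: group dashes onto the following bracket
def tokStep (st : List (Char × Int) × Int) (ch : Char) : List (Char × Int) × Int :=
  if ch = '-' then (st.1, st.2 + 1)
  else if ch = '<' ∨ ch = '>' then (st.1 ++ [(ch, st.2)], 0)
  else st

-- pass 2 of B: emit from a (predecessor, current) event pair
def emitStep (out : List (List Int)) (p : (Option Char × Int) × (Option Char × Int)) :
    List (List Int) :=
  if p.2.1 = some '>' then out ++ [[if p.1.1 = some '<' then 0 else 1, p.2.2]]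
  else if p.1.1 = some '<' then out ++ [[-1, p.2.2]]
  else out

def solution_alt (image : String) : List (List Int) :=
  let tok := image.toList.foldl tokStep ([], 0)
  let evs := tok.1.map (fun e => (some e.1, e.2))
  let answer := (List.zip (((none : Option Char), (0 : Int)) :: evs) evs).foldl emitStep []
  if tok.2 ≠ 0 then answer ++ [[-1, tok.2]] else answer

-- ===== PRECONDITION & SPEC =====
def Spec_solution (image : String) (out : List (List Int)) : Prop := out = solution_alt image
instance (image : String) (out : List (List Int)) : Decidable (Spec_solution image out) := by unfold Spec_solution; infer_instance

-- ===== CLAIM (what is proved, stated in full; the proofs are below) =====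
def Claim_equal_solution : Prop := ∀ (image : String), Dom_solution image → Spec_solution image (solution image)

-- ===== LEMMAS AND PROOFS =====

-- event list produced by the tokenizer, recursively
def T : List Char → Int → List (Char × Int)
  | [], _ => []
  | ch :: r, cnt =>
    if ch = '-' then T r (cnt + 1)
    else if ch = '<' ∨ ch = '>' then (ch, cnt) :: T r 0
    else T r cnt

-- trailing dash count, recursively
def C : List Char → Int → Int
  | [], cnt => cnt
  | ch :: r, cnt =>
    if ch = '-' then C r (cnt + 1)
    else if ch = '<' ∨ ch = '>' then C r 0
    else C r cnt

-- emissions, interpreting events against the previous bracket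
def interp : Option Char → List (Char × Int) → List (List Int)
  | _, [] => []
  | p, (ch, c) :: rest =>
    (if ch = '>' then [[if p = some '<' then 0 else 1, c]]
     else if p = some '<' then [[-1, c]] else [])
    ++ interp (some ch) rest

-- last bracket character seen
def lastP : Option Char → List Char → Option Char
  | p, [] => p
  | p, ch :: r => if ch = '<' ∨ ch = '>' then lastP (some ch) r else lastP p r

-- A's `type` as a function of the last bracket
def tyOf : Option Char → Option Int
  | none => none
  | some c => if c = '<' then some (-1) else some 1

lemma tokFold (l : List Char) : ∀ (ev : List (Char × Int)) (cnt : Int),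
    List.foldl tokStep (ev, cnt) l = (ev ++ T l cnt, C l cnt) := by
  induction l with
  | nil => intro ev cnt; simp [T, C]
  | cons ch r ih =>
      intro ev cnt
      by_cases h1 : ch = '-'
      · simp [tokStep, T, C, h1, ih]
      · by_cases h2 : ch = '<' ∨ ch = '>'
        · simp [tokStep, T, C, h1, h2, ih]
        · simp [tokStep, T, C, h1, h2, ih]

lemma aFold (l : List Char) : ∀ (ans : List (List Int)) (cnt : Int) (p : Option Char),
    (p = none ∨ p = some '<' ∨ p = some '>') →
    List.foldl stepA (ans, cnt, tyOf p) l
      = (ans ++ interp p (T l cnt), C l cnt, tyOf (lastP p l)) := by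
  induction l with
  | nil => intro ans cnt p _; simp [T, C, interp, lastP]
  | cons ch r ih =>
      intro ans cnt p hp
      by_cases h1 : ch = '-'
      · simpa [stepA, T, C, lastP, h1] using ih ans (cnt + 1) p hp
      · by_cases h2 : ch = '<'
        · have hty : (tyOf p = some (-1)) ↔ (p = some '<') := by
            rcases hp with h | h | h <;> subst h <;> simp [tyOf]
          by_cases hpc : p = some '<'
          · have h := ih (ans ++ [[-1, cnt]]) 0 (some '<') (by simp)
            simp [tyOf] at h
            simp [stepA, T, C, lastP, interp, h2, hpc]
            simpa [tyOf] using h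
          · have h := ih ans 0 (some '<') (by simp)
            simp [tyOf] at h
            simp [stepA, T, C, lastP, interp, h2, hty, hpc]
            simpa [tyOf] using h
        · by_cases h3 : ch = '>'
          · have h := ih (ans ++ [[if p = some '<' then 0 else 1, cnt]]) 0 (some '>') (by simp)
            simp [tyOf] at h
            have hcase : (if tyOf p = some (-1) then ans ++ [[0, cnt]]
                else if tyOf p = some 1 ∨ tyOf p = none then ans ++ [[1, cnt]] else ans)
                = ans ++ [[if p = some '<' then 0 else 1, cnt]] := by
              rcases hp with h | h | h <;> subst h <;> simp [tyOf]
            simp [stepA, T, C, lastP, interp, h3, hcase]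
            simpa [tyOf] using h
          · simpa [stepA, T, C, lastP, h1, h2, h3] using ih ans cnt p hp

lemma bFold (ev : List (Char × Int)) : ∀ (p : Option Char) (c : Int) (out : List (List Int)),
    List.foldl emitStep out
      (List.zip ((p, c) :: ev.map (fun e => (some e.1, e.2)))
        (ev.map (fun e => (some e.1, e.2))))
      = out ++ interp p ev := by
  induction ev with
  | nil => intro p c out; simp [interp]
  | cons e rest ih =>
      intro p c out
      obtain ⟨ch, cc⟩ := e
      by_cases h1 : ch = '>'
      · simp [emitStep, interp, h1, ih]
      · by_cases h2 : p = some '<'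
        · simp [emitStep, interp, h1, h2, ih]
        · simp [emitStep, interp, h1, h2, ih]

-- ===== VERDICT (by name: the statement is the Claim_ definition above) =====
theorem solution_spec : Claim_equal_solution := by
  intro image _
  unfold Spec_solution solution solution_alt
  have ha := aFold image.toList [] 0 none (Or.inl rfl)
  simp only [tyOf] at ha
  rw [ha, tokFold image.toList [] 0]
  simp [bFold (T image.toList 0) none 0 []]
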